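-- pv_equiv track=rewrite | github.com/Vachana33/Demo_innovo | backend/app/routers/documents.py | _split_sections_into_batches
-- ===== SOURCE A (Python) =====
-- from typing import List, Optional, Tuple
--
-- def _split_sections_into_batches(sections: List[dict], batch_size: int = 4) -> List[List[dict]]:
--     """
--     Split sections into batches of 3-5 headings for chunked generation.
--     Default batch_size is 4, but will vary between 3-5 to balance efficiency and reliability.
--     """
--     batches = []
--     current_batch = []
--
--     for section in sections:
--         current_batch.append(section)
--         if len(current_batch) >= batch_size:
--             batches.append(current_batch)
--             current_batch = []
--             # Vary batch size slightly (3-5) for better distribution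
--             batch_size = 3 if batch_size == 5 else 5 if batch_size == 3 else 4
--
--     # Add remaining sections as final batch
--     if current_batch:
--         batches.append(current_batch)
--
--     return batches
-- ===== SOURCE B (Python) =====
-- from typing import List, Optional, Tuple
--
-- def _split_sections_into_batches(sections: List[dict], batch_size: int = 4) -> List[List[dict]]:
--     """Split sections into variable-size batches by repeatedly slicing a prefix off the rest."""
--     batches = []
--     rest = list(sections)
--     while rest:
--         step = max(batch_size, 1)
--         batches.append(rest[:step])
--         rest = rest[step:]
--         batch_size = 3 if batch_size == 5 else 5 if batch_size == 3 else 4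
--     return batches
-- ===== Notes on version B (the rewrite author's own statement) =====
-- stated objective: alternative
-- what changed: Replaces the element-by-element accumulation with a flush condition by a slicing loop that peels a whole batch (max(batch_size,1) elements) off the remaining list per iteration, applying the same size toggle between batches.
import Mathlib
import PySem

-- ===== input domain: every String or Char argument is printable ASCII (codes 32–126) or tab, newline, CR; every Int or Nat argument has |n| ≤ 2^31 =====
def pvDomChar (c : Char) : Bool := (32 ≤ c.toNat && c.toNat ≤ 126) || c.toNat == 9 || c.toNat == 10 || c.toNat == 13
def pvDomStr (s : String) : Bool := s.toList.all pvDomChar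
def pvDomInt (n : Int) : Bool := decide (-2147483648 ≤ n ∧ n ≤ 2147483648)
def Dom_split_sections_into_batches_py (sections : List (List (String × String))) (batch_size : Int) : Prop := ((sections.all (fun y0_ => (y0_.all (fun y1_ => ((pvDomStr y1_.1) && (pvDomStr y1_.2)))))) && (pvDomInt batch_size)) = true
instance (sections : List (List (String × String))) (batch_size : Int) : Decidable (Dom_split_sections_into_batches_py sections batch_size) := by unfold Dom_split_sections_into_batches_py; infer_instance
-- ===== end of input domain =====

-- B replaces A's element-by-element accumulation with a loop that slices one whole batch
-- off the remaining list per iteration (objective: alternative decomposition, same cost).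

-- the size toggle shared by both programs: 3 if bs == 5 else 5 if bs == 3 else 4
def pvNextSize (bs : Int) : Int := if bs = 5 then 3 else if bs = 3 then 5 else 4

-- ===== PORT A =====
-- A's loop over `sections`, carrying the partial `current_batch` and the current `batch_size`;
-- completed batches are emitted in order (Python appends them to `batches`).
def pvGoA (sections : List (List (String × String))) (cur : List (List (String × String)))
    (bs : Int) : List (List (List (String × String))) :=
  match sections with
  | [] => if cur = [] then [] else [cur]           -- "if current_batch: batches.append(current_batch)"
  | s :: rest =>
    let cur' := cur ++ [s]                          -- current_batch.append(section)
    if (cur'.length : Int) ≥ bs then                -- if len(current_batch) >= batch_size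
      cur' :: pvGoA rest [] (pvNextSize bs)
    else
      pvGoA rest cur' bs

def split_sections_into_batches_py (sections : List (List (String × String))) (batch_size : Int) : List (List (List (String × String))) :=
  pvGoA sections [] batch_size

-- ===== PORT B =====
-- B's while-loop: while rest: step = max(batch_size,1); emit rest[:step]; rest = rest[step:].
-- rest[:k] / rest[k:] with k ≥ 1 are exactly List.take / List.drop.
def pvGoB (rest : List (List (String × String))) (bs : Int) : List (List (List (String × String))) :=
  if h : rest = [] then []
  else
    let step := (max bs 1).toNat
    rest.take step :: pvGoB (rest.drop step) (pvNextSize bs)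
termination_by rest.length
decreasing_by
  simp only [List.length_drop]
  have : rest.length ≠ 0 := by simpa [List.length_eq_zero_iff] using h
  omega

def split_sections_into_batches_py_alt (sections : List (List (String × String))) (batch_size : Int) : List (List (List (String × String))) :=
  pvGoB sections batch_size

-- ===== PRECONDITION & SPEC =====
def Spec_split_sections_into_batches_py (sections : List (List (String × String))) (batch_size : Int) (out : List (List (List (String × String)))) : Prop := out = split_sections_into_batches_py_alt sections batch_size
instance (sections : List (List (String × String))) (batch_size : Int) (out : List (List (List (String × String)))) : Decidable (Spec_split_sections_into_batches_py sections batch_size out) := by unfold Spec_split_sections_into_batches_py; infer_instance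

-- ===== CLAIM (what is proved, stated in full; the proofs are below) =====
def Claim_equal_split_sections_into_batches_py : Prop := ∀ (sections : List (List (String × String))) (batch_size : Int), Dom_split_sections_into_batches_py sections batch_size → Spec_split_sections_into_batches_py sections batch_size (split_sections_into_batches_py sections batch_size)

-- ===== LEMMAS AND PROOFS =====

-- Characterisation of A's loop: with the invariant cur.length + 1 ≤ max(bs,1),
-- the loop either packs everything into one final batch (when rest is short),
-- or emits cur filled up to max(bs,1) elements and restarts with an empty cur.
lemma pvGoA_eq (bs : Int) :
    ∀ (rest cur : List (List (String × String))),
      (cur.length : Int) + 1 ≤ max bs 1 →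
      pvGoA rest cur bs =
        if rest.length + cur.length < (max bs 1).toNat then
          (if cur ++ rest = [] then [] else [cur ++ rest])
        else
          (cur ++ rest.take ((max bs 1).toNat - cur.length)) ::
            pvGoA (rest.drop ((max bs 1).toNat - cur.length)) [] (pvNextSize bs) := by
  intro rest
  induction rest with
  | nil =>
    intro cur hcur
    have hM : (0:Int) ≤ max bs 1 := by omega
    have : cur.length < (max bs 1).toNat := by omega
    simp [pvGoA, this]
  | cons s r ih =>
    intro cur hcur
    have hM1 : (1:Int) ≤ max bs 1 := by omega
    by_cases hfl : (cur.length : Int) + 1 = max bs 1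
    · -- flush happens now
      have hge : ((cur ++ [s]).length : Int) ≥ bs := by
        simp only [List.length_append, List.length_cons, List.length_nil]
        push_cast; omega
      have hk : (max bs 1).toNat - cur.length = 1 := by omega
      have hnotlt : ¬ ((s :: r).length + cur.length < (max bs 1).toNat) := by
        simp only [List.length_cons]; omega
      simp only [pvGoA, hge, if_pos, hnotlt, if_false, hk,
        List.take_succ_cons, List.take_zero, List.drop_succ_cons, List.drop_zero]
    · -- no flush: cur grows by s
      have hlt : (cur.length : Int) + 1 < max bs 1 := lt_of_le_of_ne hcur hfl
      have hnge : ¬ (((cur ++ [s]).length : Int) ≥ bs) := by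
        simp only [List.length_append, List.length_cons, List.length_nil]
        push_cast; omega
      have hcur' : ((cur ++ [s]).length : Int) + 1 ≤ max bs 1 := by
        simp only [List.length_append, List.length_cons, List.length_nil]
        push_cast; omega
      have := ih (cur ++ [s]) hcur'
      simp only [pvGoA, hnge, if_false] at this ⊢
      rw [this]
      have hlen : (cur ++ [s]).length = cur.length + 1 := by simp
      have hcond : (r.length + (cur ++ [s]).length < (max bs 1).toNat) ↔
          ((s :: r).length + cur.length < (max bs 1).toNat) := by
        simp only [hlen, List.length_cons]; omega
      by_cases hc : (s :: r).length + cur.length < (max bs 1).toNat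
      · rw [if_pos (hcond.mpr hc), if_pos hc]
        simp
      · rw [if_neg (fun h => hc (hcond.mp h)), if_neg hc]
        have hk : (max bs 1).toNat - cur.length = ((max bs 1).toNat - (cur ++ [s]).length) + 1 := by
          simp only [hlen]; omega
        rw [hk]
        simp [List.take_succ_cons, List.drop_succ_cons]

lemma pvGoB_nil (bs : Int) : pvGoB [] bs = [] := by
  rw [pvGoB]; simp

lemma pvGoA_eq_pvGoB : ∀ (rest : List (List (String × String))) (bs : Int),
    pvGoA rest [] bs = pvGoB rest bs := by
  intro rest bs
  fun_induction pvGoB rest bs with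
  | case1 bs => simp [pvGoA]
  | case2 rest bs h step ih =>
    have h0 : rest.length ≠ 0 := by simpa [List.length_eq_zero_iff] using h
    have hM1 : (1:Int) ≤ max bs 1 := by omega
    rw [pvGoA_eq bs rest [] (by simp)]
    have hstep : step = (max bs 1).toNat := rfl
    simp only [List.length_nil, Nat.sub_zero, List.nil_append, Nat.add_zero, hstep]
    by_cases hc : rest.length < (max bs 1).toNat
    · rw [if_pos hc]
      have htake : rest.take (max bs 1).toNat = rest := List.take_of_length_le (by omega)
      have hdrop : rest.drop (max bs 1).toNat = [] := List.drop_eq_nil_of_le (by omega)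
      rw [htake, hdrop, pvGoB_nil]
      simp [h]
    · rw [if_neg hc]
      exact congrArg _ ih

-- ===== VERDICT (by name: the statement is the Claim_ definition above) =====
theorem split_sections_into_batches_py_spec : Claim_equal_split_sections_into_batches_py := by
  intro sections batch_size _
  show split_sections_into_batches_py sections batch_size = split_sections_into_batches_py_alt sections batch_size
  unfold split_sections_into_batches_py split_sections_into_batches_py_alt
  exact pvGoA_eq_pvGoB sections batch_size
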